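-- pv_equiv track=rewrite | github.com/USTC-Hackergame/hackergame2022-writeups | players/GalaxySnail/src/q17_惜字如金/q1_search_key.py | XZRJify_word
-- ===== SOURCE A (Python) =====
-- import itertools
--
-- AEIOU = frozenset("AEIOUaeiou")
--
-- def XZRJify_word(word):
--     if len(word) > 1 and word[-1] in "Ee" and word[-2] not in AEIOU:
--         word = word[:-1]
--
--     result = []
--     for c, c_next in itertools.pairwise(list(word) + [""]):
--         if c not in AEIOU and c == c_next:
--             continue
--         result.append(c)
--
--     return "".join(result)
-- ===== SOURCE B (Python) =====
-- import itertools
--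
-- AEIOU = frozenset("AEIOUaeiou")
--
-- def XZRJify_word(word):
--     if len(word) > 1 and word[-1] in "Ee" and word[-2] not in AEIOU:
--         word = word[:-1]
--
--     pieces = []
--     for ch, grp in itertools.groupby(word):
--         if ch in AEIOU:
--             pieces.append("".join(grp))
--         else:
--             pieces.append(ch)
--
--     return "".join(pieces)
-- ===== Notes on version B (the rewrite author's own statement) =====
-- stated objective: idiomatic
-- what changed: Replaces the pairwise sliding window with sentinel by itertools.groupby over equal-character runs: each run contributes its full text if the character is a vowel, otherwise a single character.
import Mathlib
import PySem

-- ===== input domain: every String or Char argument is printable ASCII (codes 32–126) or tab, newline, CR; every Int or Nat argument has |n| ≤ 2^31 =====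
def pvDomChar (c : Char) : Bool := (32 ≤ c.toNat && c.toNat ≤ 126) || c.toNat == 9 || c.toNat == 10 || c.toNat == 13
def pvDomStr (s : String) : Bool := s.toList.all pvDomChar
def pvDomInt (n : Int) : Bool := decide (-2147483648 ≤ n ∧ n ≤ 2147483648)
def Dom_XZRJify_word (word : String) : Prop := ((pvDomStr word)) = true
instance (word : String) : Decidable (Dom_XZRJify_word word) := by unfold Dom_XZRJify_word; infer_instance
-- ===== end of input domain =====

-- B replaces A's pairwise sliding window (with "" sentinel) by a run-based groupby
-- traversal: each run of equal characters yields itself for vowels, one char otherwise.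
-- Objective: idiomatic; same cost.

-- ===== PORT A =====
def pvVowel (c : Char) : Bool := c = 'A' || c = 'E' || c = 'I' || c = 'O' || c = 'U' ||
  c = 'a' || c = 'e' || c = 'i' || c = 'o' || c = 'u'

-- the silent-e guard: word[:-1] if len>1, last in "Ee", second-to-last not vowel
def pvDropE (l : List Char) : List Char :=
  match PySem.List.pyGet? l (-1), PySem.List.pyGet? l (-2) with
  | some c1, some c2 =>
      if l.length > 1 ∧ (c1 = 'E' ∨ c1 = 'e') ∧ ¬ pvVowel c2 = true then l.dropLast else l
  | _, _ => l

-- A's loop over itertools.pairwise(list(word) + [""]): the final sentinel pair (c,"")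
-- never satisfies c == c_next, so the last char is always appended.
def pvPairLoop : List Char → List Char
  | [] => []
  | [c] => [c]
  | c :: c2 :: rest =>
      if ¬ pvVowel c = true ∧ c = c2 then pvPairLoop (c2 :: rest)
      else c :: pvPairLoop (c2 :: rest)

def XZRJify_word (word : String) : String :=
  String.ofList (pvPairLoop (pvDropE word.toList))

-- ===== PORT B =====
-- groupby: peel one maximal run of equal characters per step
def pvGroupLoop : List Char → List Char
  | [] => []
  | c :: rest =>
      (if pvVowel c then c :: rest.takeWhile (· = c) else [c]) ++
        pvGroupLoop (rest.dropWhile (· = c))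
  termination_by l => l.length
  decreasing_by
    simp only [List.length_cons]
    exact Nat.lt_succ_of_le (List.length_dropWhile_le _ _)

def XZRJify_word_alt (word : String) : String :=
  String.ofList (pvGroupLoop (pvDropE word.toList))

-- ===== PRECONDITION & SPEC =====
def Spec_XZRJify_word (word : String) (out : String) : Prop := out = XZRJify_word_alt word
instance (word : String) (out : String) : Decidable (Spec_XZRJify_word word out) := by unfold Spec_XZRJify_word; infer_instance

-- ===== CLAIM (what is proved, stated in full; the proofs are below) =====
def Claim_equal_XZRJify_word : Prop := ∀ (word : String), Dom_XZRJify_word word → Spec_XZRJify_word word (XZRJify_word word)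

-- ===== LEMMAS AND PROOFS =====
theorem pvGroupLoop_nil : pvGroupLoop [] = [] := by
  rw [pvGroupLoop]

theorem pvLoop_eq : ∀ (l : List Char), pvPairLoop l = pvGroupLoop l := by
  intro l
  induction l with
  | nil => rw [pvGroupLoop_nil]; rfl
  | cons c rest ih =>
    cases rest with
    | nil => rw [pvGroupLoop]; simp [pvPairLoop, pvGroupLoop_nil]
    | cons c2 rest2 =>
      by_cases hc : c = c2
      · subst hc
        by_cases hv : pvVowel c = true
        · have : pvPairLoop (c :: c :: rest2) = c :: pvPairLoop (c :: rest2) := by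
            simp [pvPairLoop, hv]
          rw [this, ih]
          rw [pvGroupLoop, pvGroupLoop]
          simp [hv, List.dropWhile]
        · have : pvPairLoop (c :: c :: rest2) = pvPairLoop (c :: rest2) := by
            simp [pvPairLoop, hv]
          rw [this, ih]
          rw [pvGroupLoop, pvGroupLoop]
          simp [hv, List.dropWhile]
      · have : pvPairLoop (c :: c2 :: rest2) = c :: pvPairLoop (c2 :: rest2) := by
          simp [pvPairLoop, hc]
        have hg : pvGroupLoop (c :: c2 :: rest2) = c :: pvGroupLoop (c2 :: rest2) := by
          rw [pvGroupLoop]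
          have h1 : (c2 :: rest2).takeWhile (· = c) = [] := by
            simp [List.takeWhile, hc, Ne.symm]
          have h2 : (c2 :: rest2).dropWhile (· = c) = c2 :: rest2 := by
            simp [List.dropWhile, hc, Ne.symm]
          rw [h1, h2]
          split <;> simp
        rw [this, ih, hg]

-- ===== VERDICT (by name: the statement is the Claim_ definition above) =====
theorem XZRJify_word_spec : Claim_equal_XZRJify_word := by
  intro word _
  unfold Spec_XZRJify_word XZRJify_word XZRJify_word_alt
  rw [pvLoop_eq]
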